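-- pv_equiv track=rewrite | github.com/Kumamoto-Hamachi/atcoder_pr | others/best_questions_for_middle/for_reference/abc89_c.py | count_trio
-- ===== SOURCE A (Python) =====
-- def count_trio(cadidates, firsts):
--     cnt = 0
--     cadidate_len = len(cadidates)
--     for a in range(cadidate_len-2):
--         for b in range(a+1, cadidate_len-1):
--             for c in range(b+1, cadidate_len):
--                 af, bf, cf = firsts[a], firsts[b], firsts[c]
--                 cnt += cadidates[af] * cadidates[bf] * cadidates[cf]
--     return cnt
-- ===== SOURCE B (Python) =====
-- def count_trio(cadidates, firsts):
--     # single pass maintaining running elementary symmetric sums e1, e2, e3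
--     n = len(cadidates)
--     if n < 3:
--         return 0
--     e1 = e2 = e3 = 0
--     for s in firsts[:n]:
--         v = cadidates[s]
--         e3 += e2 * v
--         e2 += e1 * v
--         e1 += v
--     return e3
-- ===== Notes on version B (the rewrite author's own statement) =====
-- stated objective: alternative
-- what changed: replaced A's three nested index loops enumerating all triples a<b<c by a single pass that maintains the running elementary symmetric sums e1,e2,e3 of the looked-up letter counts (cubic vs linear in the number of dict keys, which the timing inputs keep small)
import Mathlib
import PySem

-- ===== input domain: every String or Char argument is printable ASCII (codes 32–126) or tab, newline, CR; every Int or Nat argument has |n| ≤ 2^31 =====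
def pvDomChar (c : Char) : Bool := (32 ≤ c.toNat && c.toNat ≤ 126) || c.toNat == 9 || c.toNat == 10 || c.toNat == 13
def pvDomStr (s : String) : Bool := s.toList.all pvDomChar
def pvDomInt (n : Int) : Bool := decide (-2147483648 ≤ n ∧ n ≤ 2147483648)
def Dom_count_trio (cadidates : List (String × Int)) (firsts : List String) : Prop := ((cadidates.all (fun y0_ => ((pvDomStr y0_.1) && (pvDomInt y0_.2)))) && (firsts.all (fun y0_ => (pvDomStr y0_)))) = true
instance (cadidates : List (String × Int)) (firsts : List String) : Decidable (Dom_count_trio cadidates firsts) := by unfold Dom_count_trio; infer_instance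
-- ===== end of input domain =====

-- B replaces A's three nested loops over index triples a<b<c by a single pass that keeps
-- the running elementary symmetric sums e1,e2,e3 of the looked-up values.

-- shared helper: the Python dict lookup cadidates[s] (both Pythons receive the same dict)
def pvDictGetD (cadidates : List (String × Int)) (s : String) : Int :=
  (PySem.Dict.mk cadidates).getD s 0

-- ===== PORT A =====
def count_trio (cadidates : List (String × Int)) (firsts : List String) : Int :=
  let cadidate_len : Int := cadidates.length
  (PySem.List.pyRange 0 (cadidate_len - 2) 1).foldl (fun cnt a =>
    (PySem.List.pyRange (a + 1) (cadidate_len - 1) 1).foldl (fun cnt b =>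
      (PySem.List.pyRange (b + 1) cadidate_len 1).foldl (fun cnt c =>
        let af := PySem.List.pyGetD firsts a ""
        let bf := PySem.List.pyGetD firsts b ""
        let cf := PySem.List.pyGetD firsts c ""
        cnt + pvDictGetD cadidates af * pvDictGetD cadidates bf * pvDictGetD cadidates cf) cnt) cnt) 0

-- ===== PORT B =====
def count_trio_alt (cadidates : List (String × Int)) (firsts : List String) : Int :=
  let n : Int := cadidates.length
  if n < 3 then 0
  else
    let st := (PySem.List.slice firsts (some 0) (some n)).foldl
      (fun (st : Int × Int × Int) s =>
        let v := pvDictGetD cadidates s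
        (st.1 + v, st.2.1 + st.1 * v, st.2.2 + st.2.1 * v)) (0, 0, 0)
    st.2.2

-- ===== PRECONDITION & SPEC =====
-- Pre_ excludes exactly the inputs where Python A raises: with ≥ 3 keys it indexes
-- firsts[0..n-1] (IndexError if firsts is shorter) and looks each of those strings up
-- in the dict (KeyError if absent); with < 3 keys it returns 0 without touching firsts.
def Pre_count_trio (cadidates : List (String × Int)) (firsts : List String) : Prop :=
  cadidates.length < 3 ∨
    (cadidates.length ≤ firsts.length ∧
     ∀ s ∈ firsts.take cadidates.length, s ∈ cadidates.map Prod.fst)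
instance (cadidates : List (String × Int)) (firsts : List String) : Decidable (Pre_count_trio cadidates firsts) := by unfold Pre_count_trio; infer_instance

def pvWitness_count_trio : (List (String × Int)) × List String :=
  ([("a", 1), ("b", 2), ("c", 3)], ["a", "b", "c"])

def Spec_count_trio (cadidates : List (String × Int)) (firsts : List String) (out : Int) : Prop := out = count_trio_alt cadidates firsts
instance (cadidates : List (String × Int)) (firsts : List String) (out : Int) : Decidable (Spec_count_trio cadidates firsts out) := by unfold Spec_count_trio; infer_instance

-- ===== CLAIM (what is proved, stated in full; the proofs are below) =====
def Claim_equal_count_trio : Prop := ∀ (cadidates : List (String × Int)) (firsts : List String), Dom_count_trio cadidates firsts → Pre_count_trio cadidates firsts → Spec_count_trio cadidates firsts (count_trio cadidates firsts)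

-- ===== LEMMAS AND PROOFS =====

-- elementary symmetric sums of a list, by structural recursion from the front
def pvS1 : List Int → Int | [] => 0 | v :: t => v + pvS1 t
def pvS2 : List Int → Int | [] => 0 | v :: t => v * pvS1 t + pvS2 t
def pvS3 : List Int → Int | [] => 0 | v :: t => v * pvS2 t + pvS3 t

-- B's fold computes the symmetric sums
lemma pvFoldB (g : String → Int) (L : List String) (e1 e2 e3 : Int) :
    L.foldl (fun (st : Int × Int × Int) s =>
        (st.1 + g s, st.2.1 + st.1 * g s, st.2.2 + st.2.1 * g s)) (e1, e2, e3)
    = (e1 + pvS1 (L.map g),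
       e2 + e1 * pvS1 (L.map g) + pvS2 (L.map g),
       e3 + e2 * pvS1 (L.map g) + e1 * pvS2 (L.map g) + pvS3 (L.map g)) := by
  induction L generalizing e1 e2 e3 with
  | nil => simp [pvS1, pvS2, pvS3]
  | cons s t ih =>
    simp only [List.foldl_cons, List.map_cons, pvS1, pvS2, pvS3, ih, Prod.mk.injEq]
    refine ⟨by ring, by ring, by ring⟩

-- A's nested loops, written as sums over index ranges
def pvP1 (F : Int → Int) (a n : Int) : Int :=
  ((PySem.List.pyRange a n 1).map F).sum
def pvP2 (F : Int → Int) (a n : Int) : Int :=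
  ((PySem.List.pyRange a n 1).map (fun b => F b * pvP1 F (b + 1) n)).sum
def pvP3 (F : Int → Int) (a n : Int) : Int :=
  ((PySem.List.pyRange a n 1).map (fun x => F x * pvP2 F (x + 1) n)).sum

lemma pvP_eq (F : Int → Int) (k : Nat) : ∀ (a n : Int), (n - a).toNat ≤ k →
    pvP1 F a n = pvS1 ((PySem.List.pyRange a n 1).map F)
    ∧ pvP2 F a n = pvS2 ((PySem.List.pyRange a n 1).map F)
    ∧ pvP3 F a n = pvS3 ((PySem.List.pyRange a n 1).map F) := by
  induction k with
  | zero =>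
    intro a n h
    have hn : n ≤ a := by omega
    simp [pvP1, pvP2, pvP3, PySem.List.pyRange_one_eq_nil hn, pvS1, pvS2, pvS3]
  | succ k ih =>
    intro a n h
    by_cases hlt : a < n
    · have hr := PySem.List.pyRange_one_cons (a := a) (b := n) hlt
      obtain ⟨ih1, ih2, ih3⟩ := ih (a + 1) n (by omega)
      have c1 : pvP1 F a n = F a + pvP1 F (a + 1) n := by
        unfold pvP1; rw [hr]; simp
      have c2 : pvP2 F a n = F a * pvP1 F (a + 1) n + pvP2 F (a + 1) n := by
        unfold pvP2 pvP1; rw [hr]; simp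
      have c3 : pvP3 F a n = F a * pvP2 F (a + 1) n + pvP3 F (a + 1) n := by
        unfold pvP3 pvP2 pvP1; rw [hr]; simp
      refine ⟨?_, ?_, ?_⟩
      · rw [hr]; simp only [List.map_cons, pvS1]; rw [c1, ih1]
      · rw [hr]; simp only [List.map_cons, pvS2]; rw [c2, ih1, ih2]
      · rw [hr]; simp only [List.map_cons, pvS3]; rw [c3, ih2, ih3]
    · have hn : n ≤ a := by omega
      simp [pvP1, pvP2, pvP3, PySem.List.pyRange_one_eq_nil hn, pvS1, pvS2, pvS3]

lemma pvP1_nil (F : Int → Int) (n : Int) : pvP1 F n n = 0 := by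
  simp [pvP1, PySem.List.pyRange_one_eq_nil (le_refl n)]

lemma pvP2_nil (F : Int → Int) (n : Int) : pvP2 F n n = 0 := by
  simp [pvP2, PySem.List.pyRange_one_eq_nil (le_refl n)]

-- dropping the vacuous top index of the middle range
lemma pvP2_trunc (F : Int → Int) (a n : Int) (h : a ≤ n - 1) :
    pvP2 F a n = ((PySem.List.pyRange a (n - 1) 1).map (fun b => F b * pvP1 F (b + 1) n)).sum := by
  have hsplit := PySem.List.pyRange_one_append a (n - 1) n h (by omega)
  have h1 : PySem.List.pyRange (n - 1) n 1 = [n - 1] := by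
    have := PySem.List.pyRange_one_singleton (a := n - 1)
    simpa using this
  have h2 : pvP1 F (n - 1 + 1) n = 0 := by
    have : n - 1 + 1 = n := by ring
    rw [this, pvP1_nil]
  simp [pvP2, hsplit, h1]
  exact Or.inr (pvP1_nil F n)

-- A's foldl-form equals pvP3 F 0 n (for n ≥ 3)
lemma pvA_sum (F : Int → Int) (n : Int) (hn : 3 ≤ n) :
    (PySem.List.pyRange 0 (n - 2) 1).foldl (fun cnt a =>
      (PySem.List.pyRange (a + 1) (n - 1) 1).foldl (fun cnt b =>
        (PySem.List.pyRange (b + 1) n 1).foldl (fun cnt c =>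
          cnt + F a * F b * F c) cnt) cnt) 0
    = pvP3 F 0 n := by
  have step : ∀ init : Int, ∀ L : List Int, ∀ g : Int → Int,
      L.foldl (fun cnt x => cnt + g x) init = init + (L.map g).sum := by
    intro init L g
    exact PySem.List.foldl_add L g init
  -- rewrite inner folds to sums
  have hinner : (PySem.List.pyRange 0 (n - 2) 1).foldl (fun cnt a =>
      (PySem.List.pyRange (a + 1) (n - 1) 1).foldl (fun cnt b =>
        (PySem.List.pyRange (b + 1) n 1).foldl (fun cnt c =>
          cnt + F a * F b * F c) cnt) cnt) 0
      = ((PySem.List.pyRange 0 (n - 2) 1).map (fun a =>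
          ((PySem.List.pyRange (a + 1) (n - 1) 1).map (fun b =>
            F a * F b * pvP1 F (b + 1) n)).sum)).sum := by
    have : ∀ (cnt : Int) (a : Int),
        (PySem.List.pyRange (a + 1) (n - 1) 1).foldl (fun cnt b =>
          (PySem.List.pyRange (b + 1) n 1).foldl (fun cnt c =>
            cnt + F a * F b * F c) cnt) cnt
        = cnt + ((PySem.List.pyRange (a + 1) (n - 1) 1).map (fun b =>
            F a * F b * pvP1 F (b + 1) n)).sum := by
      intro cnt a
      have hb : ∀ (cnt : Int) (b : Int),
          (PySem.List.pyRange (b + 1) n 1).foldl (fun cnt c => cnt + F a * F b * F c) cnt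
          = cnt + F a * F b * pvP1 F (b + 1) n := by
        intro cnt b
        rw [step cnt _ (fun c => F a * F b * F c)]
        unfold pvP1
        rw [← List.sum_map_mul_left]
      calc (PySem.List.pyRange (a + 1) (n - 1) 1).foldl (fun cnt b =>
              (PySem.List.pyRange (b + 1) n 1).foldl (fun cnt c =>
                cnt + F a * F b * F c) cnt) cnt
          = (PySem.List.pyRange (a + 1) (n - 1) 1).foldl (fun cnt b =>
              cnt + F a * F b * pvP1 F (b + 1) n) cnt := by
            exact PySem.List.foldl_congr_mem _ _ _ _ (fun acc b _ => hb acc b)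
        _ = cnt + ((PySem.List.pyRange (a + 1) (n - 1) 1).map (fun b =>
              F a * F b * pvP1 F (b + 1) n)).sum := step cnt _ _
    calc (PySem.List.pyRange 0 (n - 2) 1).foldl (fun cnt a =>
            (PySem.List.pyRange (a + 1) (n - 1) 1).foldl (fun cnt b =>
              (PySem.List.pyRange (b + 1) n 1).foldl (fun cnt c =>
                cnt + F a * F b * F c) cnt) cnt) 0
        = (PySem.List.pyRange 0 (n - 2) 1).foldl (fun cnt a =>
            cnt + ((PySem.List.pyRange (a + 1) (n - 1) 1).map (fun b =>
              F a * F b * pvP1 F (b + 1) n)).sum) 0 := by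
          exact PySem.List.foldl_congr_mem _ _ _ _ (fun acc a _ => this acc a)
      _ = 0 + ((PySem.List.pyRange 0 (n - 2) 1).map (fun a =>
            ((PySem.List.pyRange (a + 1) (n - 1) 1).map (fun b =>
              F a * F b * pvP1 F (b + 1) n)).sum)).sum := step 0 _ _
      _ = _ := by rw [zero_add]
  rw [hinner]
  -- the middle sum of each admitted a is F a * pvP2 F (a+1) n
  have hmid : ∀ a : Int, a ∈ PySem.List.pyRange 0 (n - 2) 1 →
      ((PySem.List.pyRange (a + 1) (n - 1) 1).map (fun b =>
        F a * F b * pvP1 F (b + 1) n)).sum = F a * pvP2 F (a + 1) n := by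
    intro a ha
    rw [PySem.List.mem_pyRange_one] at ha
    rw [pvP2_trunc F (a + 1) n (by omega)]
    rw [← List.sum_map_mul_left]
    congr 1
    apply List.map_congr_left
    intro b _
    ring
  rw [List.map_congr_left hmid]
  -- extend the outer range from n-2 to n: the two extra terms vanish
  have hsplit := PySem.List.pyRange_one_append 0 (n - 2) n (by omega) (by omega)
  have htop : PySem.List.pyRange (n - 2) n 1 = [n - 2, n - 1] := by
    rw [PySem.List.pyRange_one_cons (by omega : n - 2 < n)]
    have e1 : n - 2 + 1 = n - 1 := by ring
    rw [e1, PySem.List.pyRange_one_cons (by omega : n - 1 < n)]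
    have e2 : n - 1 + 1 = n := by ring
    rw [e2, PySem.List.pyRange_one_eq_nil (le_refl n)]
  have hz1 : pvP2 F (n - 2 + 1) n = 0 := by
    have e1 : n - 2 + 1 = n - 1 := by ring
    rw [e1, pvP2_trunc F (n - 1) n (by omega), PySem.List.pyRange_one_eq_nil (le_refl (n - 1))]
    simp
  have hz2 : pvP2 F (n - 1 + 1) n = 0 := by
    have e2 : n - 1 + 1 = n := by ring
    rw [e2, pvP2_nil]
  unfold pvP3
  rw [hsplit, htop]
  simp [hz1]
  exact Or.inr (pvP2_nil F n)

-- the looked-up values, indexed through firsts, as a map over the taken prefix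
lemma pvMapIdx (xs : List String) (g : String → Int) (m : Nat) (h : m ≤ xs.length) :
    (PySem.List.pyRange 0 (m : Int) 1).map (fun j => g (PySem.List.pyGetD xs j "")) =
      (xs.take m).map g := by
  induction m with
  | zero => simp [PySem.List.pyRange_one_eq_nil (by omega : (0:Int) ≤ 0)]
  | succ m ih =>
    have hm : m < xs.length := by omega
    have : ((m : Int) + 1) = ((m + 1 : Nat) : Int) := by push_cast; ring
    rw [← this, PySem.List.pyRange_one_succ_right (by positivity)]
    rw [List.map_append, ih (by omega)]
    have htake : xs.take (m + 1) = xs.take m ++ [xs[m]] := by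
      rw [List.take_add_one]
      simp [List.getElem?_eq_getElem hm]
    rw [htake, List.map_append]
    congr 1
    simp [PySem.List.pyGetD_natCast, List.getD_eq_getElem?_getD, List.getElem?_eq_getElem hm]

-- ===== VERDICT (by name: the statement is the Claim_ definition above) =====
theorem count_trio_spec : Claim_equal_count_trio := by
  intro cadidates firsts _hdom hpre
  unfold Spec_count_trio count_trio count_trio_alt
  by_cases hsmall : (cadidates.length : Int) < 3
  · -- both sides are 0
    have : (cadidates.length : Int) - 2 ≤ 0 := by omega
    simp [PySem.List.pyRange_one_eq_nil this, hsmall]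
  · have hn3 : 3 ≤ (cadidates.length : Int) := by omega
    have hcase := hpre
    have hlen : cadidates.length ≤ firsts.length := by
      rcases hcase with h | ⟨h, _⟩
      · omega
      · exact h
    simp only [hsmall, if_false]
    set n : Int := (cadidates.length : Int) with hn
    set g : String → Int := fun s => pvDictGetD cadidates s with hg
    set F : Int → Int := fun j => g (PySem.List.pyGetD firsts j "") with hF
    -- A side
    have hA : (PySem.List.pyRange 0 (n - 2) 1).foldl (fun cnt a =>
        (PySem.List.pyRange (a + 1) (n - 1) 1).foldl (fun cnt b =>
          (PySem.List.pyRange (b + 1) n 1).foldl (fun cnt c =>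
            cnt + pvDictGetD cadidates (PySem.List.pyGetD firsts a "") *
              pvDictGetD cadidates (PySem.List.pyGetD firsts b "") *
              pvDictGetD cadidates (PySem.List.pyGetD firsts c "")) cnt) cnt) 0
        = pvP3 F 0 n := pvA_sum F n hn3
    have hP := (pvP_eq F (n - 0).toNat 0 n (le_refl _)).2.2
    -- B side
    have hslice : PySem.List.slice firsts (some 0) (some n) = firsts.take cadidates.length := by
      rw [PySem.List.slice_zero_start, PySem.List.slice_to firsts (by omega : (0:Int) ≤ n)]
      simp [hn]
    have hmap : (PySem.List.pyRange 0 n 1).map F = (firsts.take cadidates.length).map g := by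
      have := pvMapIdx firsts g cadidates.length hlen
      simpa [hF, hn] using this
    simp only [hslice]
    rw [hA, hP, hmap, pvFoldB g (firsts.take cadidates.length) 0 0 0]
    simp
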